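-- pv_equiv track=rewrite | github.com/sophiazhi/airborne | api/api.py | query_forms
-- ===== SOURCE A (Python) =====
-- def query_forms(forms, query):
--     """
--         query_forms(forms, query) : queries form based on the query parameters
--         forms : list of form objects, where a form is a dictionary mapping string to string
--         query : a dictionary mapping string to string or "any" if it the query parameter is over all values
--     """
--     queried_forms = forms
--     for query_param in query:
--         query_value = query[query_param].lower()
--         if query_value == "any": continue
--         if query_param == "date": continue
--         queried_forms = [form for form in queried_forms if form[query_param].lower() == query_value]
--     return queried_forms
-- ===== SOURCE B (Python) =====
-- def query_forms(forms, query):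
--     # Collect active constraints once, then a single short-circuiting pass over forms.
--     active = []
--     for query_param in query:
--         query_value = query[query_param].lower()
--         if query_value == "any" or query_param == "date":
--             continue
--         active.append((query_param, query_value))
--     return [form for form in forms
--             if all(form[p].lower() == v for p, v in active)]
-- ===== Notes on version B (the rewrite author's own statement) =====
-- stated objective: alternative
-- what changed: B precomputes the active (param, lowered value) constraints once and filters the forms in a single pass with a short-circuiting all(...), instead of A's one filtering pass (rebuilding the list) per query parameter.
-- outside the precondition, e.g. on query_forms([{'x': 'a'}], {'x': 'b', 'y': 'c'}): A returns [], B returns []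
import Mathlib
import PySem

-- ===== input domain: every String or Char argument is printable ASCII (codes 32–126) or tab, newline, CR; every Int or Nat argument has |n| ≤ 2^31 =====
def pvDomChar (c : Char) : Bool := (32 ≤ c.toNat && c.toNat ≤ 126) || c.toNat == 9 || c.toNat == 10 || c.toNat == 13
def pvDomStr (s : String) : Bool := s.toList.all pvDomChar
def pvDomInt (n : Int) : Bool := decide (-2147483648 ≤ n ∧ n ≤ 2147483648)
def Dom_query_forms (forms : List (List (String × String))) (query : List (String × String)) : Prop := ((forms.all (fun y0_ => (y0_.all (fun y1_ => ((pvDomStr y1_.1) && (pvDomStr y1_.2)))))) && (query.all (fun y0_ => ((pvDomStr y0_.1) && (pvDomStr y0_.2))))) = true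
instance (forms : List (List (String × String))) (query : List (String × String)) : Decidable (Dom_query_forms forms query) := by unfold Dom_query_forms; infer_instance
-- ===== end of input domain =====

-- B precomputes the active (param, lowered value) constraints once and filters the forms in a
-- single pass, instead of A's one filtering pass (with a rebuilt list) per query parameter.


-- Python's `form[key]` on a string-keyed dict (assoc list, first match); "" stands for the
-- KeyError case, which Pre_ excludes.
def pvLookup (m : List (String × String)) (k : String) : String :=
  ((m.find? (fun kv => kv.1 == k)).map Prod.snd).getD ""

-- ===== PORT A =====
-- the body of A's `for query_param in query:` loop
def pvStepA (queried : List (List (String × String))) (kv : String × String) :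
    List (List (String × String)) :=
  let query_value := PySem.Str.lower kv.2
  if query_value = "any" then queried
  else if kv.1 = "date" then queried
  else queried.filter (fun form => decide (PySem.Str.lower (pvLookup form kv.1) = query_value))

def query_forms (forms : List (List (String × String))) (query : List (String × String)) : List (List (String × String)) :=
  query.foldl pvStepA forms

-- ===== PORT B =====
-- B's first loop: collect the active (param, lowered value) constraints in query order
def pvActive (query : List (String × String)) : List (String × String) :=
  query.foldl (fun active kv =>
    let query_value := PySem.Str.lower kv.2
    if query_value = "any" ∨ kv.1 = "date" then active
    else active ++ [(kv.1, query_value)]) []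

-- B's inner `all(form[p].lower() == v for p, v in active)`
def pvChk (form : List (String × String)) (pv : String × String) : Bool :=
  decide (PySem.Str.lower (pvLookup form pv.1) = pv.2)

def query_forms_alt (forms : List (List (String × String))) (query : List (String × String)) : List (List (String × String)) :=
  let active := pvActive query
  forms.filter (fun form => active.all (pvChk form))

-- ===== PRECONDITION & SPEC =====
-- Pre_ excludes association lists with duplicate keys (those denote no Python dict, so the
-- first-match lookup order is accidental) and inputs where some form lacks an active query
-- parameter, on which Python A may raise KeyError.
def Pre_query_forms (forms : List (List (String × String))) (query : List (String × String)) : Prop :=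
  (query.map Prod.fst).Nodup ∧
  (∀ form ∈ forms, (form.map Prod.fst).Nodup) ∧
  (∀ kv ∈ query, ¬(PySem.Str.lower kv.2 = "any" ∨ kv.1 = "date") →
      ∀ form ∈ forms, kv.1 ∈ form.map Prod.fst)
instance (forms : List (List (String × String))) (query : List (String × String)) : Decidable (Pre_query_forms forms query) := by unfold Pre_query_forms; infer_instance

def pvWitness_query_forms : (List (List (String × String))) × (List (String × String)) :=
  ([[("color", "Red")], [("color", "blue")]], [("color", "RED"), ("size", "any")])

def Spec_query_forms (forms : List (List (String × String))) (query : List (String × String)) (out : List (List (String × String))) : Prop := out = query_forms_alt forms query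
instance (forms : List (List (String × String))) (query : List (String × String)) (out : List (List (String × String))) : Decidable (Spec_query_forms forms query out) := by unfold Spec_query_forms; infer_instance

-- ===== CLAIM (what is proved, stated in full; the proofs are below) =====
def Claim_equal_query_forms : Prop := ∀ (forms : List (List (String × String))) (query : List (String × String)), Dom_query_forms forms query → Pre_query_forms forms query → Spec_query_forms forms query (query_forms forms query)

-- ===== LEMMAS AND PROOFS =====

-- B's accumulation loop is the filtered-and-lowered query.
theorem pvActive_eq (query : List (String × String)) :
    pvActive query =
      (query.map (fun kv => (kv.1, PySem.Str.lower kv.2))).filter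
        (fun pv => decide (¬(pv.2 = "any" ∨ pv.1 = "date"))) := by
  unfold pvActive
  rw [List.filter_map]
  rw [PySem.List.foldl_congr_mem (g := fun active kv =>
      if (decide (¬(PySem.Str.lower kv.2 = "any" ∨ kv.1 = "date"))) = true then
        active ++ [(kv.1, PySem.Str.lower kv.2)] else active)]
  · rw [PySem.List.foldl_append_if]
    rfl
  · intro active kv _
    by_cases h : PySem.Str.lower kv.2 = "any" ∨ kv.1 = "date"
    · rw [if_pos h, if_neg (by simp [h])]
    · rw [if_neg h, if_pos (by simp [h])]

-- A's fold of per-parameter filters is one filter by the conjunction of per-parameter tests.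
theorem foldl_filter_eq (q : List (String × String)) (fs : List (List (String × String))) :
    q.foldl pvStepA fs
    = fs.filter (fun form =>
        ((q.map (fun kv => (kv.1, PySem.Str.lower kv.2))).filter
            (fun pv => decide (¬(pv.2 = "any" ∨ pv.1 = "date")))).all (pvChk form)) := by
  induction q generalizing fs with
  | nil => exact (List.filter_true fs).symm
  | cons kv q ih =>
      rw [List.foldl_cons, List.map_cons, List.filter_cons]
      by_cases h1 : PySem.Str.lower kv.2 = "any"
      · rw [show pvStepA fs kv = fs from if_pos h1,
          show (decide (¬((kv.1, PySem.Str.lower kv.2).2 = "any" ∨ (kv.1, PySem.Str.lower kv.2).1 = "date"))) = false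
            from by simp [h1]]
        rw [if_neg (by simp)]
        exact ih fs
      · by_cases h2 : kv.1 = "date"
        · rw [show pvStepA fs kv = fs from by unfold pvStepA; rw [if_neg h1, if_pos h2],
            show (decide (¬((kv.1, PySem.Str.lower kv.2).2 = "any" ∨ (kv.1, PySem.Str.lower kv.2).1 = "date"))) = false
              from by simp [h2]]
          rw [if_neg (by simp)]
          exact ih fs
        · rw [show pvStepA fs kv
              = fs.filter (fun form => decide (PySem.Str.lower (pvLookup form kv.1) = PySem.Str.lower kv.2))
              from by unfold pvStepA; rw [if_neg h1, if_neg h2],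
            show (decide (¬((kv.1, PySem.Str.lower kv.2).2 = "any" ∨ (kv.1, PySem.Str.lower kv.2).1 = "date"))) = true
              from by simp [h1, h2]]
          rw [if_pos rfl, ih, List.filter_filter]
          apply List.filter_congr
          intro form _
          rw [List.all_cons, Bool.and_comm]
          rfl

-- ===== VERDICT (by name: the statement is the Claim_ definition above) =====
theorem query_forms_spec : Claim_equal_query_forms := by
  intro forms query _ _
  unfold Spec_query_forms query_forms query_forms_alt
  rw [pvActive_eq, foldl_filter_eq]
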